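-- pv_equiv track=rewrite | github.com/DavKnei/eartraining_trainer | code/helper_func_app.py | get_lick_registers
-- ===== SOURCE A (Python) =====
-- def get_lick_registers(practice_lick_data, all_licks_from_scale):
--     """
--     Analyzes a practice lick to determine which registers it uses by
--     comparing its notes to the defined scale parts.
--
--     Parameters
--     ----------
--     practice_lick_data : list
--         The 'lick_data' list for the lick being analyzed.
--     all_licks_from_scale : list
--         The complete list of all lick objects for the current scale,
--         where the first three are the low, middle, and high scale parts.
--
--     Returns
--     -------
--     list
--         A sorted list of unique register names used (e.g., ["low", "middle"]).
--     """
--     if not practice_lick_data or len(all_licks_from_scale) < 3: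
--         return []
--
--     # Create a set of notes in the practice lick for efficient lookup
--     practice_notes = {note['tab'] for note in practice_lick_data}
--
--     # Create sets of notes for each defined scale register
--     low_scale_notes = {note['tab'] for note in all_licks_from_scale[0]['lick_data']}
--     middle_scale_notes = {note['tab'] for note in all_licks_from_scale[1]['lick_data']}
--     high_scale_notes = {note['tab'] for note in all_licks_from_scale[2]['lick_data']}
--
--     found_registers = set()
--
--     # Check for intersection between the practice lick's notes and each register's notes
--     if not practice_notes.isdisjoint(low_scale_notes):
--         found_registers.add("low")
--     if not practice_notes.isdisjoint(middle_scale_notes):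
--         found_registers.add("middle")
--     if not practice_notes.isdisjoint(high_scale_notes):
--         found_registers.add("high")
--
--     return sorted(list(found_registers))
-- ===== SOURCE B (Python) =====
-- def get_lick_registers(practice_lick_data, all_licks_from_scale):
--     """Index-based re-implementation: build one dict mapping each tab to the
--     set of register names whose scale part contains it, then union the
--     registers hit by the practice lick's notes."""
--     if not practice_lick_data or len(all_licks_from_scale) < 3:
--         return []
--
--     index = {}
--     for lick, name in zip(all_licks_from_scale[:3], ("low", "middle", "high")):
--         for note in lick['lick_data']:
--             index.setdefault(note['tab'], set()).add(name)
--
--     found = set()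
--     for note in practice_lick_data:
--         found |= index.get(note['tab'], set())
--
--     return sorted(found)
-- ===== Notes on version B (the rewrite author's own statement) =====
-- stated objective: alternative
-- what changed: Instead of building three register note-sets and testing each for intersection with the practice set, B builds one inverted index from each tab to the registers containing it and unions index hits while scanning the practice notes once.
import Mathlib
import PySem

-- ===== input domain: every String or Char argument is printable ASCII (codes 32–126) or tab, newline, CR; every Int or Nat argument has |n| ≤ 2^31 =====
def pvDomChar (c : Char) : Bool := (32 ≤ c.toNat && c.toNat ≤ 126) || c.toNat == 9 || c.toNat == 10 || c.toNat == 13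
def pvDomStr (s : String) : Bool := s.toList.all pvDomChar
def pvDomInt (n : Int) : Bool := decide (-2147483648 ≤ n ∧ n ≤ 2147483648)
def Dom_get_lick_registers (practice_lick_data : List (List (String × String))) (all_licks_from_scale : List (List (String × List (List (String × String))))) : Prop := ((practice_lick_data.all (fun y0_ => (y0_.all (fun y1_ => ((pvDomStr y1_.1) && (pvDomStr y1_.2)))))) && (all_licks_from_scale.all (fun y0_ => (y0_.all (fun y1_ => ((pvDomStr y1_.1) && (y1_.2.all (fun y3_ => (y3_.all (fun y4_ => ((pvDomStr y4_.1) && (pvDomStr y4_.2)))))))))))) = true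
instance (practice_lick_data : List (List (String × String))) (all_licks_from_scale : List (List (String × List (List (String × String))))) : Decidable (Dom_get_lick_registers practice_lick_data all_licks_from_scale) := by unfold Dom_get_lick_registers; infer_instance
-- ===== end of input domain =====

-- B replaces A's three per-register note-sets and disjointness tests by one inverted
-- index tab → registers and a single union-scan over the practice notes (objective:
-- alternative decomposition, same cost).

-- ===== PORT A =====
-- note['tab'] / lick['lick_data'] are ported with Dict.getD and a default; Pre_ excludes
-- exactly the inputs where the key is missing (Python raises KeyError there).
def get_lick_registers (practice_lick_data : List (List (String × String))) (all_licks_from_scale : List (List (String × List (List (String × String))))) : List String :=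
  if practice_lick_data = [] ∨ PySem.List.len all_licks_from_scale < 3 then []
  else
    let practice_notes : PySem.Set String :=
      PySem.Set.ofList (practice_lick_data.map (fun note => (PySem.Dict.mk note).getD "tab" ""))
    let low_scale_notes : PySem.Set String :=
      PySem.Set.ofList (((PySem.Dict.mk (PySem.List.pyGetD all_licks_from_scale 0 [])).getD "lick_data" []).map (fun note => (PySem.Dict.mk note).getD "tab" ""))
    let middle_scale_notes : PySem.Set String :=
      PySem.Set.ofList (((PySem.Dict.mk (PySem.List.pyGetD all_licks_from_scale 1 [])).getD "lick_data" []).map (fun note => (PySem.Dict.mk note).getD "tab" ""))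
    let high_scale_notes : PySem.Set String :=
      PySem.Set.ofList (((PySem.Dict.mk (PySem.List.pyGetD all_licks_from_scale 2 [])).getD "lick_data" []).map (fun note => (PySem.Dict.mk note).getD "tab" ""))
    let found0 : PySem.Set String := PySem.Set.empty
    let found1 := if !(practice_notes.isdisjoint low_scale_notes) then PySem.Set.add found0 "low" else found0
    let found2 := if !(practice_notes.isdisjoint middle_scale_notes) then PySem.Set.add found1 "middle" else found1
    let found3 := if !(practice_notes.isdisjoint high_scale_notes) then PySem.Set.add found2 "high" else found2
    PySem.List.sorted found3 (fun x => x) false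

-- ===== PORT B =====
def glr_tab (note : List (String × String)) : String := (PySem.Dict.mk note).getD "tab" ""

-- one (lick, name) step of the index-building loop: for note in lick['lick_data']: index.setdefault(note['tab'], set()).add(name)
def glr_addPart (idx : PySem.Dict String (PySem.Set String)) (pr : (List (String × List (List (String × String)))) × String) : PySem.Dict String (PySem.Set String) :=
  ((PySem.Dict.mk pr.1).getD "lick_data" []).foldl
    (fun d note => d.insert (glr_tab note) (PySem.Set.add (d.getD (glr_tab note) PySem.Set.empty) pr.2)) idx

def get_lick_registers_alt (practice_lick_data : List (List (String × String))) (all_licks_from_scale : List (List (String × List (List (String × String))))) : List String :=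
  if practice_lick_data = [] ∨ PySem.List.len all_licks_from_scale < 3 then []
  else
    let index := ((PySem.List.slice all_licks_from_scale none (some 3)).zip ["low", "middle", "high"]).foldl glr_addPart PySem.Dict.empty
    let found := practice_lick_data.foldl
      (fun s note => PySem.Set.union s (index.getD (glr_tab note) PySem.Set.empty)) PySem.Set.empty
    PySem.List.sorted found (fun x => x) false

-- ===== PRECONDITION & SPEC =====
-- Pre_ excludes exactly the inputs on which Python A raises KeyError: past the two guards,
-- every practice note must have a 'tab' key, each of the first three scale licks a
-- 'lick_data' key, and each of their notes a 'tab' key.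
def Pre_get_lick_registers (practice_lick_data : List (List (String × String))) (all_licks_from_scale : List (List (String × List (List (String × String))))) : Prop :=
  practice_lick_data = [] ∨ all_licks_from_scale.length < 3 ∨
    ((∀ n ∈ practice_lick_data, ((PySem.Dict.mk n).get? "tab").isSome) ∧
     ∀ l ∈ all_licks_from_scale.take 3,
       ((PySem.Dict.mk l).get? "lick_data").isSome ∧
       ∀ n ∈ (PySem.Dict.mk l).getD "lick_data" [], ((PySem.Dict.mk n).get? "tab").isSome)
instance (practice_lick_data : List (List (String × String))) (all_licks_from_scale : List (List (String × List (List (String × String))))) : Decidable (Pre_get_lick_registers practice_lick_data all_licks_from_scale) := by unfold Pre_get_lick_registers; infer_instance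

def pvWitness_get_lick_registers : (List (List (String × String))) × (List (List (String × List (List (String × String))))) :=
  ([[("tab", "2")]],
   [[("lick_data", [[("tab", "1")], [("tab", "2")]])],
    [("lick_data", [[("tab", "3")]])],
    [("lick_data", [[("tab", "4")]])]])

def Spec_get_lick_registers (practice_lick_data : List (List (String × String))) (all_licks_from_scale : List (List (String × List (List (String × String))))) (out : List String) : Prop := out = get_lick_registers_alt practice_lick_data all_licks_from_scale
instance (practice_lick_data : List (List (String × String))) (all_licks_from_scale : List (List (String × List (List (String × String))))) (out : List String) : Decidable (Spec_get_lick_registers practice_lick_data all_licks_from_scale out) := by unfold Spec_get_lick_registers; infer_instance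

-- ===== CLAIM (what is proved, stated in full; the proofs are below) =====
def Claim_equal_get_lick_registers : Prop := ∀ (practice_lick_data : List (List (String × String))) (all_licks_from_scale : List (List (String × List (List (String × String))))), Dom_get_lick_registers practice_lick_data all_licks_from_scale → Pre_get_lick_registers practice_lick_data all_licks_from_scale → Spec_get_lick_registers practice_lick_data all_licks_from_scale (get_lick_registers practice_lick_data all_licks_from_scale)

-- ===== LEMMAS AND PROOFS =====

-- membership in the index built by one part's loop
theorem glr_mem_addPart_getD (notes : List (List (String × String))) (name : String)
    (idx : PySem.Dict String (PySem.Set String)) (t x : String) :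
    (x ∈ (notes.foldl (fun d note => d.insert (glr_tab note) (PySem.Set.add (d.getD (glr_tab note) PySem.Set.empty) name)) idx).getD t PySem.Set.empty) ↔
      x ∈ idx.getD t PySem.Set.empty ∨ (x = name ∧ t ∈ notes.map glr_tab) := by
  induction notes generalizing idx with
  | nil => simp
  | cons n rest ih =>
    simp only [List.foldl_cons, ih, PySem.Dict.getD_insert, List.map_cons, List.mem_cons]
    by_cases h : t = glr_tab n
    · simp [h, PySem.Set.mem_add]
      try tauto
    · simp [h]
      try tauto

-- membership in the found-set union loop
theorem glr_mem_found (p : List (List (String × String))) (idx : PySem.Dict String (PySem.Set String))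
    (s : PySem.Set String) (x : String) :
    (x ∈ p.foldl (fun s note => PySem.Set.union s (idx.getD (glr_tab note) PySem.Set.empty)) s) ↔
      x ∈ s ∨ ∃ n ∈ p, x ∈ idx.getD (glr_tab n) PySem.Set.empty := by
  induction p generalizing s with
  | nil => simp
  | cons n rest ih =>
    simp only [List.foldl_cons, ih, PySem.Set.mem_union, List.mem_cons]
    constructor
    · rintro (((h | h) | ⟨m, hm, hx⟩))
      · exact Or.inl h
      · exact Or.inr ⟨n, Or.inl rfl, h⟩
      · exact Or.inr ⟨m, Or.inr hm, hx⟩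
    · rintro (h | ⟨m, (rfl | hm), hx⟩)
      · exact Or.inl (Or.inl h)
      · exact Or.inl (Or.inr hx)
      · exact Or.inr ⟨m, hm, hx⟩

theorem glr_nodup_found (p : List (List (String × String))) (idx : PySem.Dict String (PySem.Set String))
    (s : PySem.Set String) (hs : s.Nodup) :
    (p.foldl (fun s note => PySem.Set.union s (idx.getD (glr_tab note) PySem.Set.empty)) s).Nodup := by
  induction p generalizing s with
  | nil => exact hs
  | cons n rest ih => exact ih _ (PySem.Set.nodup_union _ _ hs)

-- A's disjointness test, in ∃-form
theorem glr_hit_iff (p ld : List (List (String × String))) :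
    ((PySem.Set.ofList (p.map glr_tab)).isdisjoint (PySem.Set.ofList (ld.map glr_tab)) = false) ↔
      ∃ n ∈ p, glr_tab n ∈ ld.map glr_tab := by
  rw [Bool.eq_false_iff, Ne, PySem.Set.isdisjoint_iff]
  push_neg
  constructor
  · rintro ⟨x, hx, hx'⟩
    rw [PySem.Set.mem_ofList] at hx hx'
    obtain ⟨n, hn, rfl⟩ := List.mem_map.mp hx
    exact ⟨n, hn, hx'⟩
  · rintro ⟨n, hn, hn'⟩
    exact ⟨glr_tab n, (PySem.Set.mem_ofList _ _).mpr (List.mem_map_of_mem hn),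
      (PySem.Set.mem_ofList _ _).mpr hn'⟩

-- A's found-set (the three guarded adds), as a named term for the proofs
def glr_found01 (p ld0 ld1 : List (List (String × String))) : PySem.Set String :=
  if !((PySem.Set.ofList (p.map glr_tab)).isdisjoint (PySem.Set.ofList (ld1.map glr_tab))) then
    PySem.Set.add (if !((PySem.Set.ofList (p.map glr_tab)).isdisjoint (PySem.Set.ofList (ld0.map glr_tab))) then PySem.Set.add PySem.Set.empty "low" else PySem.Set.empty) "middle"
  else
    (if !((PySem.Set.ofList (p.map glr_tab)).isdisjoint (PySem.Set.ofList (ld0.map glr_tab))) then PySem.Set.add PySem.Set.empty "low" else PySem.Set.empty)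

def glr_foundA (p ld0 ld1 ld2 : List (List (String × String))) : PySem.Set String :=
  if !((PySem.Set.ofList (p.map glr_tab)).isdisjoint (PySem.Set.ofList (ld2.map glr_tab))) then
    PySem.Set.add (glr_found01 p ld0 ld1) "high"
  else glr_found01 p ld0 ld1

theorem glr_disjoint_eq (p ld : List (List (String × String))) :
    (PySem.Set.ofList (p.map glr_tab)).isdisjoint (PySem.Set.ofList (ld.map glr_tab)) =
      !decide (∃ n ∈ p, glr_tab n ∈ ld.map glr_tab) := by
  by_cases hP : ∃ n ∈ p, glr_tab n ∈ ld.map glr_tab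
  · rw [(glr_hit_iff p ld).mpr hP]; simpa using hP
  · have h : ¬((PySem.Set.ofList (p.map glr_tab)).isdisjoint (PySem.Set.ofList (ld.map glr_tab)) = false) :=
      fun hf => hP ((glr_hit_iff p ld).mp hf)
    rw [Bool.not_eq_false] at h
    rw [h]; simpa using hP

theorem glr_mem_foundA (p ld0 ld1 ld2 : List (List (String × String))) (x : String) :
    x ∈ glr_foundA p ld0 ld1 ld2 ↔
      (x = "low" ∧ ∃ n ∈ p, glr_tab n ∈ ld0.map glr_tab) ∨
      (x = "middle" ∧ ∃ n ∈ p, glr_tab n ∈ ld1.map glr_tab) ∨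
      (x = "high" ∧ ∃ n ∈ p, glr_tab n ∈ ld2.map glr_tab) := by
  unfold glr_foundA glr_found01
  rw [glr_disjoint_eq p ld0, glr_disjoint_eq p ld1, glr_disjoint_eq p ld2]
  simp only [Bool.not_not, decide_eq_true_eq]
  split_ifs with h2 h1 h0 h0' h1' h0'' h0''' <;>
    simp_all [PySem.Set.empty] <;> try tauto

theorem glr_nodup_foundA (p ld0 ld1 ld2 : List (List (String × String))) :
    (glr_foundA p ld0 ld1 ld2).Nodup := by
  unfold glr_foundA glr_found01
  split_ifs <;> decide

theorem get_lick_registers_spec : Claim_equal_get_lick_registers := by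
  intro p a _hdom _hpre
  unfold Spec_get_lick_registers get_lick_registers get_lick_registers_alt
  by_cases hg : p = [] ∨ PySem.List.len a < 3
  · rw [if_pos hg, if_pos hg]
  · rw [if_neg hg, if_neg hg]
    push_neg at hg
    obtain ⟨hp, hlen⟩ := hg
    rw [PySem.List.len_eq] at hlen
    have hn : 3 ≤ a.length := by exact_mod_cast hlen
    obtain ⟨x0, x1, x2, t, rfl⟩ : ∃ x0 x1 x2 t, a = x0 :: x1 :: x2 :: t := by
      match a, hn with
      | x0 :: x1 :: x2 :: t, _ => exact ⟨x0, x1, x2, t, rfl⟩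
    have e0 : PySem.List.pyGetD (x0::x1::x2::t) 0 [] = x0 := by simp [pysem]
    have e1 : PySem.List.pyGetD (x0::x1::x2::t) 1 [] = x1 := by simp [pysem]
    have e2 : PySem.List.pyGetD (x0::x1::x2::t) 2 [] = x2 := by simp [pysem]
    have es : PySem.List.slice (x0::x1::x2::t) none (some 3) = [x0,x1,x2] := by
      rw [show (3:Int) = ((3:Nat):Int) from rfl, PySem.List.slice_to_natCast]
      simp
    rw [e0, e1, e2, es]
    set ld0 := (PySem.Dict.mk x0).getD "lick_data" [] with hld0
    set ld1 := (PySem.Dict.mk x1).getD "lick_data" [] with hld1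
    set ld2 := (PySem.Dict.mk x2).getD "lick_data" [] with hld2
    show PySem.List.sorted (glr_foundA p ld0 ld1 ld2) (fun x => x) false =
      PySem.List.sorted (p.foldl (fun s note => PySem.Set.union s
        (([(x0, "low"), (x1, "middle"), (x2, "high")].foldl glr_addPart PySem.Dict.empty).getD (glr_tab note) PySem.Set.empty)) PySem.Set.empty) (fun x => x) false
    apply PySem.List.sorted_eq_sorted_of_perm _ _ _ (fun _ _ h => h)
    apply (List.perm_ext_iff_of_nodup (glr_nodup_foundA p ld0 ld1 ld2)
      (glr_nodup_found p _ _ List.nodup_nil)).mpr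
    intro x
    rw [glr_mem_foundA, glr_mem_found]
    simp only [List.foldl_cons, List.foldl_nil, glr_addPart, ← hld0, ← hld1, ← hld2,
      glr_mem_addPart_getD, PySem.Dict.getD_empty]
    simp only [PySem.Set.empty, List.not_mem_nil, false_or]
    constructor
    · rintro (⟨rfl, n, hn, hm⟩ | ⟨rfl, n, hn, hm⟩ | ⟨rfl, n, hn, hm⟩)
      · exact ⟨n, hn, Or.inl (Or.inl ⟨rfl, hm⟩)⟩
      · exact ⟨n, hn, Or.inl (Or.inr ⟨rfl, hm⟩)⟩
      · exact ⟨n, hn, Or.inr ⟨rfl, hm⟩⟩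
    · rintro ⟨n, hn, ((⟨rfl, hm⟩ | ⟨rfl, hm⟩) | ⟨rfl, hm⟩)⟩
      · exact Or.inl ⟨rfl, n, hn, hm⟩
      · exact Or.inr (Or.inl ⟨rfl, n, hn, hm⟩)
      · exact Or.inr (Or.inr ⟨rfl, n, hn, hm⟩)
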